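-- pv_equiv track=rewrite | github.com/Janelinux/satellite | satellite/XDA/predict.py | translate_predictions
-- ===== SOURCE A (Python) =====
-- def translate_predictions(starts, ends):
--     # Pair starts/ends to create function bounds
--     bounds = []
--
--     if len(starts) == 0 or len(ends) == 0:
--         return bounds
--     label_list=[]
--     combined_list=sorted(starts+ends)
--     for num in combined_list:
--         if num in starts:
--             label_list.append('S')
--         elif num in ends:
--             label_list.append('E')
--     label_num=0
--     while label_num+1<len(label_list):
--         if label_list[label_num]=='S' and label_list[label_num+1]=='E':
--             bounds.append((combined_list[label_num],combined_list[label_num+1]))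
--         label_num+=1
--
--
--     return bounds
-- ===== SOURCE B (Python) =====
-- def translate_predictions(starts, ends):
--     # Two-pointer walk over two disjoint sorted value sets instead of labelling
--     # a sorted concatenation: duplicates never create an S,E adjacency and a
--     # shared value counts as a start, so only distinct start values and distinct
--     # end-only values matter; a start s yields a bound exactly when the next
--     # distinct value after s is an end-only value.
--     if not starts or not ends:
--         return []
--     sset = set(starts)
--     S = sorted(sset)
--     E = sorted(v for v in set(ends) if v not in sset)
--     out = []
--     j = 0
--     for i, s in enumerate(S):
--         while j < len(E) and E[j] < s:
--             j += 1
--         if j < len(E) and (i + 1 >= len(S) or E[j] < S[i + 1]):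
--             out.append((s, E[j]))
--     return out
-- ===== Notes on version B (the rewrite author's own statement) =====
-- stated objective: faster
-- what changed: B never builds or labels the sorted concatenation: it sorts the distinct start values and the distinct end-only values separately and walks the two disjoint sorted lists with a single advancing pointer, emitting (s, e) when the first end-only value at or above s precedes the next start value.
import Mathlib
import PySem

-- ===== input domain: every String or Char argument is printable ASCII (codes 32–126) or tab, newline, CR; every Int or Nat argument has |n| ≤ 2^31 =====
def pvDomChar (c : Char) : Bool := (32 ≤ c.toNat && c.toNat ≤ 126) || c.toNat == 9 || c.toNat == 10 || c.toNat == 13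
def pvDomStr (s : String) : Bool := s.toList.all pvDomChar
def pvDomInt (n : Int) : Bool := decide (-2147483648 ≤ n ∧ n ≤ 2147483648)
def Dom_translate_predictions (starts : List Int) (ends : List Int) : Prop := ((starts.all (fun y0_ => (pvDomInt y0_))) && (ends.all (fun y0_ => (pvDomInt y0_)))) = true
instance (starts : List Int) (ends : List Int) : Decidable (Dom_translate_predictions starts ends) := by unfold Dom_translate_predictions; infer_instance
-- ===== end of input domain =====

-- B replaces A's labelled scan of the sorted concatenation by a two-pointer
-- walk over the sorted distinct start values and end-only values
-- (objective: faster; return value only).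

-- ===== PORT A =====
-- for num in combined_list: if num in starts: append 'S' elif num in ends: append 'E'
def pyLabelLoop (starts ends combined : List Int) : List Char :=
  combined.foldl
    (fun acc num =>
      if starts.contains num then acc ++ ['S']
      else if ends.contains num then acc ++ ['E']
      else acc) []

-- while label_num+1 < len(label_list): …; indices are in range by the guard,
-- so getD with a dummy default is exact here
def pyWhile (labels : List Char) (combined : List Int) (i : Nat)
    (bounds : List (Int × Int)) : List (Int × Int) :=
  if _h : i + 1 < labels.length then
    pyWhile labels combined (i + 1)
      (if labels.getD i ' ' = 'S' ∧ labels.getD (i + 1) ' ' = 'E' then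
        bounds ++ [(combined.getD i 0, combined.getD (i + 1) 0)]
      else bounds)
  else bounds
termination_by labels.length - i

def translate_predictions (starts : List Int) (ends : List Int) : List (Int × Int) :=
  if starts.length == 0 || ends.length == 0 then []
  else
    let combined := PySem.List.sorted (starts ++ ends) (fun x => x) false
    let labels := pyLabelLoop starts ends combined
    pyWhile labels combined 0 []

-- ===== PORT B =====
-- while j < len(E) and E[j] < s: j += 1   (access guarded by j < len(E), so getD is exact)
def bAdv (E : List Int) (s : Int) (j : Nat) : Nat :=
  if _h : j < E.length ∧ E.getD j 0 < s then bAdv E s (j + 1) else j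
termination_by E.length - j
decreasing_by omega

-- for i, s in enumerate(S): …  (index-based loop with lookahead S[i+1])
def bLoop (S E : List Int) (i j : Nat) (out : List (Int × Int)) : List (Int × Int) :=
  if _h : i < S.length then
    let s := S.getD i 0
    let j' := bAdv E s j
    bLoop S E (i + 1) j'
      (if j' < E.length ∧ (i + 1 ≥ S.length ∨ E.getD j' 0 < S.getD (i + 1) 0) then
        out ++ [(s, E.getD j' 0)]
      else out)
  else out
termination_by S.length - i

def translate_predictions_alt (starts : List Int) (ends : List Int) : List (Int × Int) :=
  if starts.isEmpty || ends.isEmpty then []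
  else
    let sset := PySem.Set.ofList starts
    let S := PySem.List.sorted sset (fun x => x) false
    let E := PySem.List.sorted ((PySem.Set.ofList ends).filter (fun v => !sset.contains v)) (fun x => x) false
    bLoop S E 0 0 []

-- ===== PRECONDITION & SPEC =====
def Spec_translate_predictions (starts : List Int) (ends : List Int) (out : List (Int × Int)) : Prop := out = translate_predictions_alt starts ends
instance (starts : List Int) (ends : List Int) (out : List (Int × Int)) : Decidable (Spec_translate_predictions starts ends out) := by unfold Spec_translate_predictions; infer_instance

-- ===== CLAIM (what is proved, stated in full; the proofs are below) =====
def Claim_equal_translate_predictions : Prop := ∀ (starts : List Int) (ends : List Int), Dom_translate_predictions starts ends → Spec_translate_predictions starts ends (translate_predictions starts ends)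

-- ===== LEMMAS AND PROOFS =====

-- the adjacent-pair view of A's label table + while loop
def pvPairs (f : Int → Char) : List Int → List (Int × Int)
  | x :: y :: rest =>
      (if f x = 'S' ∧ f y = 'E' then [(x, y)] else []) ++ pvPairs f (y :: rest)
  | _ => []

-- structural (list-suffix) view of B's index loop
def bEmit (s : Int) (E' S' : List Int) : List (Int × Int) :=
  match E', S' with
  | [], _ => []
  | e :: _, [] => [(s, e)]
  | e :: _, s' :: _ => if e < s' then [(s, e)] else []

def bRec : List Int → List Int → List (Int × Int)
  | [], _ => []
  | s :: S', E =>
      bEmit s (E.dropWhile (fun e => e < s)) S' ++ bRec S' (E.dropWhile (fun e => e < s))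

-- collapse adjacent duplicates
def pvDd : List Int → List Int
  | [] => []
  | [x] => [x]
  | x :: y :: r => if x = y then pvDd (y :: r) else x :: pvDd (y :: r)

theorem pyLabelLoop_eq_map (starts ends : List Int) (c : List Int)
    (h : ∀ n ∈ c, n ∈ starts ∨ n ∈ ends) :
    pyLabelLoop starts ends c =
      c.map (fun n => if starts.contains n then 'S' else 'E') := by
  unfold pyLabelLoop
  suffices H : ∀ (c : List Int) (acc : List Char),
      (∀ n ∈ c, n ∈ starts ∨ n ∈ ends) →
      c.foldl (fun acc num =>
        if starts.contains num then acc ++ ['S']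
        else if ends.contains num then acc ++ ['E'] else acc) acc =
      acc ++ c.map (fun n => if starts.contains n then 'S' else 'E') by
    simpa using H c [] h
  intro c
  induction c with
  | nil => intro acc _; simp
  | cons x t ih =>
      intro acc hx
      have hmem := hx x (by simp)
      simp only [List.foldl_cons, List.map_cons]
      by_cases hs : starts.contains x
      · rw [if_pos hs, if_pos hs, ih _ (fun n hn => hx n (by simp [hn]))]
        simp
      · have he : ends.contains x := by
          rcases hmem with h1 | h1
          · exact absurd (List.contains_iff_mem.mpr h1) hs
          · exact List.contains_iff_mem.mpr h1
        rw [if_neg hs, if_pos he, if_neg hs, ih _ (fun n hn => hx n (by simp [hn]))]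
        simp

theorem pvPairs_short (f : Int → Char) (l : List Int) (h : l.length ≤ 1) :
    pvPairs f l = [] := by
  match l, h with
  | [], _ => rfl
  | [x], _ => rfl

theorem pyWhile_eq_pairs (f : Int → Char) (c : List Int) :
    ∀ (i : Nat) (acc : List (Int × Int)),
      pyWhile (c.map f) c i acc = acc ++ pvPairs f (c.drop i) := by
  intro i
  induction' hfuel : c.length - i using Nat.strong_induction_on with n ih generalizing i
  intro acc
  rw [pyWhile]
  by_cases h : i + 1 < (c.map f).length
  · rw [dif_pos h]
    have hlen : i + 1 < c.length := by simpa using h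
    have hi : i < c.length := by omega
    have hd1 : c.drop i = c.getD i 0 :: c.drop (i + 1) := by
      rw [List.getD_eq_getElem _ _ hi]; exact List.drop_eq_getElem_cons hi
    have hd2 : c.drop (i + 1) = c.getD (i + 1) 0 :: c.drop (i + 2) := by
      rw [List.getD_eq_getElem _ _ hlen]; exact List.drop_eq_getElem_cons hlen
    have hg1 : (c.map f).getD i ' ' = f (c.getD i 0) := by
      rw [List.getD_eq_getElem _ _ (by simpa using hi), List.getD_eq_getElem _ _ hi]
      simp
    have hg2 : (c.map f).getD (i + 1) ' ' = f (c.getD (i + 1) 0) := by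
      rw [List.getD_eq_getElem _ _ (by simpa using hlen), List.getD_eq_getElem _ _ hlen]
      simp
    have ihn := ih (c.length - (i + 1)) (by omega) (i + 1) rfl
    rw [ihn, hd1, hd2, pvPairs, ← hd2, hg1, hg2]
    by_cases hcond : f (c.getD i 0) = 'S' ∧ f (c.getD (i + 1) 0) = 'E'
    · rw [if_pos hcond, if_pos hcond]; simp
    · rw [if_neg hcond, if_neg hcond]; simp
  · rw [dif_neg h]
    have : (c.drop i).length ≤ 1 := by
      simp only [List.length_drop]
      simp only [List.length_map] at h
      omega
    rw [pvPairs_short f _ this, List.append_nil]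

-- ---- pvDd facts ----

theorem pvDd_head (y : Int) (r : List Int) : ∃ t, pvDd (y :: r) = y :: t := by
  induction r generalizing y with
  | nil => exact ⟨[], rfl⟩
  | cons z r ih =>
      by_cases h : y = z
      · obtain ⟨t, ht⟩ := ih z
        refine ⟨t, ?_⟩
        rw [pvDd, if_pos h, ht, h]
      · exact ⟨pvDd (z :: r), by rw [pvDd, if_neg h]⟩

theorem pvPairs_pvDd (f : Int → Char) (l : List Int) :
    pvPairs f (pvDd l) = pvPairs f l := by
  induction l with
  | nil => rfl
  | cons x l ih =>
      cases l with
      | nil => rfl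
      | cons y r =>
          by_cases h : x = y
          · have hxy : pvPairs f (x :: y :: r) = pvPairs f (y :: r) := by
              obtain rfl := h
              show (if f x = 'S' ∧ f x = 'E' then [(x, x)] else []) ++ pvPairs f (x :: r) =
                pvPairs f (x :: r)
              rw [if_neg, List.nil_append]
              rintro ⟨h1, h2⟩; rw [h1] at h2; exact absurd h2 (by decide)
            rw [hxy, pvDd, if_pos h, ih]
          · obtain ⟨t, ht⟩ := pvDd_head y r
            rw [pvDd, if_neg h, ht, pvPairs, ← ht, ih, pvPairs]

theorem mem_pvDd (l : List Int) (x : Int) : x ∈ pvDd l ↔ x ∈ l := by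
  induction l with
  | nil => simp [pvDd]
  | cons a l ih =>
      cases l with
      | nil => simp [pvDd]
      | cons b r =>
          by_cases h : a = b
          · rw [pvDd, if_pos h]
            subst h
            constructor
            · intro hx; exact List.mem_cons_of_mem _ (ih.mp hx)
            · intro hx
              rcases List.mem_cons.mp hx with h1 | h1
              · exact ih.mpr (h1 ▸ List.mem_cons_self)
              · exact ih.mpr h1
          · rw [pvDd, if_neg h]
            simp only [List.mem_cons] at *
            constructor
            · rintro (h1 | h1)
              · exact Or.inl h1
              · exact Or.inr (ih.mp h1)
            · rintro (h1 | h1)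
              · exact Or.inl h1
              · exact Or.inr (ih.mpr h1)

theorem pvDd_pairwise_lt (l : List Int) (h : l.Pairwise (· ≤ ·)) :
    (pvDd l).Pairwise (· < ·) := by
  induction l with
  | nil => exact List.Pairwise.nil
  | cons a l ih =>
      cases l with
      | nil => simp [pvDd]
      | cons b r =>
          have hab : a ≤ b := (List.pairwise_cons.mp h).1 b List.mem_cons_self
          have htail : (b :: r).Pairwise (· ≤ ·) := (List.pairwise_cons.mp h).2
          by_cases hh : a = b
          · rw [pvDd, if_pos hh]; exact ih htail
          · rw [pvDd, if_neg hh]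
            refine List.pairwise_cons.mpr ⟨?_, ih htail⟩
            intro x hx
            have hxm : x ∈ b :: r := (mem_pvDd _ _).mp hx
            have hble : b ≤ x := by
              rcases List.mem_cons.mp hxm with h1 | h1
              · exact h1 ▸ le_refl b
              · exact List.rel_of_pairwise_cons htail h1
            exact lt_of_lt_of_le (lt_of_le_of_ne hab hh) hble

-- ---- bAdv / bLoop ↔ bRec ----

theorem bAdv_drop (E : List Int) (s : Int) :
    ∀ j : Nat, E.drop (bAdv E s j) = (E.drop j).dropWhile (fun e => e < s) := by
  intro j
  induction' hfuel : E.length - j using Nat.strong_induction_on with n ih generalizing j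
  rw [bAdv]
  by_cases h : j < E.length ∧ E.getD j 0 < s
  · rw [dif_pos h]
    have hj : j < E.length := h.1
    have hdrop : E.drop j = E.getD j 0 :: E.drop (j + 1) := by
      rw [List.getD_eq_getElem _ _ hj]; exact List.drop_eq_getElem_cons hj
    rw [ih (E.length - (j + 1)) (by omega) (j + 1) rfl, hdrop,
        List.dropWhile_cons, if_pos (by simpa using h.2)]
  · rw [dif_neg h]
    by_cases hj : j < E.length
    · have hlt : ¬ E.getD j 0 < s := fun hc => h ⟨hj, hc⟩
      have hdrop : E.drop j = E.getD j 0 :: E.drop (j + 1) := by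
        rw [List.getD_eq_getElem _ _ hj]; exact List.drop_eq_getElem_cons hj
      rw [hdrop, List.dropWhile_cons, if_neg (by simpa using hlt)]
    · rw [List.drop_eq_nil_of_le (by omega), List.dropWhile_nil]

theorem bAdv_le_length (E : List Int) (s : Int) :
    ∀ j : Nat, j ≤ E.length → bAdv E s j ≤ E.length := by
  intro j
  induction' hfuel : E.length - j using Nat.strong_induction_on with n ih generalizing j
  intro hj
  rw [bAdv]
  by_cases h : j < E.length ∧ E.getD j 0 < s
  · rw [dif_pos h]; exact ih (E.length - (j + 1)) (by omega) (j + 1) rfl (by omega)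
  · rw [dif_neg h]; exact hj

theorem bLoop_eq_bRec (S E : List Int) :
    ∀ (i j : Nat) (out : List (Int × Int)), j ≤ E.length →
      bLoop S E i j out = out ++ bRec (S.drop i) (E.drop j) := by
  intro i
  induction' hfuel : S.length - i using Nat.strong_induction_on with n ih generalizing i
  intro j out hj
  rw [bLoop]
  by_cases h : i < S.length
  · rw [dif_pos h]
    have hS : S.drop i = S.getD i 0 :: S.drop (i + 1) := by
      rw [List.getD_eq_getElem _ _ h]; exact List.drop_eq_getElem_cons h
    set s := S.getD i 0 with hs
    set j' := bAdv E s j with hj'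
    have hj'le : j' ≤ E.length := bAdv_le_length E s j hj
    have hE' : E.drop j' = (E.drop j).dropWhile (fun e => e < s) := bAdv_drop E s j
    rw [ih (S.length - (i + 1)) (by omega) (i + 1) rfl j' _ hj'le, hS, bRec, ← hE']
    have hmatch :
        bEmit s (E.drop j') (S.drop (i + 1)) =
        (if j' < E.length ∧ (i + 1 ≥ S.length ∨ E.getD j' 0 < S.getD (i + 1) 0) then
          [(s, E.getD j' 0)] else []) := by
      by_cases hje : j' < E.length
      · have hEd : E.drop j' = E.getD j' 0 :: E.drop (j' + 1) := by
          rw [List.getD_eq_getElem _ _ hje]; exact List.drop_eq_getElem_cons hje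
        by_cases hil : i + 1 < S.length
        · have hSd : S.drop (i + 1) = S.getD (i + 1) 0 :: S.drop (i + 2) := by
            rw [List.getD_eq_getElem _ _ hil]; exact List.drop_eq_getElem_cons hil
          rw [hEd, hSd]
          show (if E.getD j' 0 < S.getD (i + 1) 0 then [(s, E.getD j' 0)] else []) = _
          by_cases hc : E.getD j' 0 < S.getD (i + 1) 0
          · rw [if_pos hc, if_pos ⟨hje, Or.inr hc⟩]
          · rw [if_neg hc, if_neg]
            rintro ⟨-, h2 | h2⟩
            · omega
            · exact hc h2
        · have hSd : S.drop (i + 1) = [] := List.drop_eq_nil_of_le (by omega)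
          rw [hEd, hSd]
          show [(s, E.getD j' 0)] = _
          rw [if_pos ⟨hje, Or.inl (by omega)⟩]
      · have hEd : E.drop j' = [] := List.drop_eq_nil_of_le (by omega)
        rw [hEd]
        show ([] : List (Int × Int)) = _
        rw [if_neg (by rintro ⟨h1, -⟩; exact hje h1)]
    rw [hmatch]
    by_cases hcond : j' < E.length ∧ (i + 1 ≥ S.length ∨ E.getD j' 0 < S.getD (i + 1) 0)
    · rw [if_pos hcond, if_pos hcond]; simp [← hj']
    · rw [if_neg hcond, if_neg hcond]; simp
  · rw [dif_neg h, List.drop_eq_nil_of_le (by omega), bRec, List.append_nil]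

-- ---- the central equivalence: pvPairs over a sorted-distinct union vs bRec ----

theorem head_of_sorted_mem (L : List Int) (x : Int)
    (hL : L.Pairwise (· < ·)) (hx : x ∈ L) (hmin : ∀ a ∈ L, ¬ a < x) :
    ∃ T, L = x :: T := by
  cases L with
  | nil => cases hx
  | cons a T =>
      rcases List.mem_cons.mp hx with h1 | h1
      · exact ⟨T, by rw [h1]⟩
      · exact absurd (List.rel_of_pairwise_cons hL h1) (hmin a List.mem_cons_self)

theorem pvPairs_cons_E (P : Int → Bool) (x : Int) (d : List Int) (hPx : P x = false) :
    pvPairs (fun n => if P n then 'S' else 'E') (x :: d) =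
      pvPairs (fun n => if P n then 'S' else 'E') d := by
  cases d with
  | nil => rfl
  | cons y r =>
      rw [pvPairs, if_neg, List.nil_append]
      rintro ⟨h1, -⟩
      rw [hPx] at h1
      exact absurd h1 (by decide)

theorem pvPairs_eq_bRec (P : Int → Bool) :
    ∀ (d S E : List Int),
      d.Pairwise (· < ·) → S.Pairwise (· < ·) → E.Pairwise (· < ·) →
      (∀ s ∈ S, P s = true) → (∀ e ∈ E, P e = false) →
      d.Perm (S ++ E) →
      pvPairs (fun n => if P n then 'S' else 'E') d = bRec S E := by
  intro d
  induction d with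
  | nil =>
      intro S E _ _ _ _ _ hperm
      have h0 := List.Perm.symm hperm
      rw [List.perm_nil] at h0
      rcases List.append_eq_nil_iff.mp h0 with ⟨h1, h2⟩
      subst h1; subst h2; rfl
  | cons x d' ih =>
      intro S E hd hS hE hPS hPE hperm
      have hxmem : x ∈ S ++ E := hperm.mem_iff.mp List.mem_cons_self
      have hmind : ∀ a, a ∈ d' → x < a := fun a ha => List.rel_of_pairwise_cons hd ha
      have hmin : ∀ a ∈ S ++ E, ¬ a < x := by
        intro a ha hlt
        have hax : a ∈ x :: d' := hperm.mem_iff.mpr ha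
        rcases List.mem_cons.mp hax with h1 | h1
        · omega
        · have := hmind a h1; omega
      have hd' : d'.Pairwise (· < ·) := (List.pairwise_cons.mp hd).2
      by_cases hPx : P x = true
      · -- x is the least remaining value and is a start: S = x :: S'
        have hxS : x ∈ S := by
          rcases List.mem_append.mp hxmem with h1 | h1
          · exact h1
          · rw [hPE x h1] at hPx; exact absurd hPx (by decide)
        obtain ⟨S', hSeq⟩ := head_of_sorted_mem S x hS hxS
          (fun a ha => hmin a (List.mem_append_left _ ha))
        subst hSeq
        have hpermtail : d'.Perm (S' ++ E) := hperm.cons_inv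
        have hS' : S'.Pairwise (· < ·) := (List.pairwise_cons.mp hS).2
        have hPS' : ∀ s ∈ S', P s = true := fun s hs => hPS s (List.mem_cons_of_mem _ hs)
        have hEgt : ∀ e ∈ E, x < e := by
          intro e he
          have hne : ¬ e = x := by
            intro hc
            have := hPE e he
            rw [hc, hPx] at this
            exact absurd this (by decide)
          have hex : e ∈ x :: d' := hperm.mem_iff.mpr (List.mem_append_right _ he)
          rcases List.mem_cons.mp hex with h1 | h1
          · exact absurd h1 hne
          · exact hmind e h1
        have hdw : E.dropWhile (fun e => decide (e < x)) = E := by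
          cases E with
          | nil => rfl
          | cons e E'' =>
              rw [List.dropWhile_cons, if_neg]
              simp only [decide_eq_true_eq]
              have := hEgt e List.mem_cons_self
              omega
        have hrec := ih S' E hd' hS' hE hPS' hPE hpermtail
        rw [bRec]
        simp only [hdw, ← hrec]
        -- compare the emitted head pairs
        cases hd'eq : d' with
        | nil =>
            have h0 := hpermtail.symm
            rw [hd'eq, List.perm_nil] at h0
            rcases List.append_eq_nil_iff.mp h0 with ⟨h1, h2⟩
            subst h1; subst h2
            rfl
        | cons y d'' =>
            have hymem : y ∈ S' ++ E :=
              hpermtail.mem_iff.mp (by rw [hd'eq]; exact List.mem_cons_self)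
            have hminy : ∀ a ∈ S' ++ E, ¬ a < y := by
              intro a ha hlt
              have had : a ∈ d' := hpermtail.mem_iff.mpr ha
              rw [hd'eq] at had
              rcases List.mem_cons.mp had with h1 | h1
              · omega
              · have hya : y < a := List.rel_of_pairwise_cons (by rw [← hd'eq]; exact hd') h1
                omega
            by_cases hPy : P y = true
            · -- y is a start: no pair on either side
              have hyS : y ∈ S' := by
                rcases List.mem_append.mp hymem with h1 | h1
                · exact h1
                · rw [hPE y h1] at hPy; exact absurd hPy (by decide)
              obtain ⟨S'', hS'eq⟩ := head_of_sorted_mem S' y hS' hyS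
                (fun a ha => hminy a (List.mem_append_left _ ha))
              have hL : pvPairs (fun n => if P n then 'S' else 'E') (x :: y :: d'') =
                  pvPairs (fun n => if P n then 'S' else 'E') (y :: d'') := by
                show (if (if P x then 'S' else 'E') = 'S' ∧ (if P y then 'S' else 'E') = 'E'
                    then [(x, y)] else []) ++
                    pvPairs (fun n => if P n then 'S' else 'E') (y :: d'') = _
                rw [if_neg, List.nil_append]
                rintro ⟨-, h2⟩
                rw [if_pos hPy] at h2
                exact absurd h2 (by decide)
              rw [hL, hS'eq]
              cases E with
              | nil =>
                  show pvPairs (fun n => if P n then 'S' else 'E') (y :: d'') =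
                    ([] : List (Int × Int)) ++ pvPairs (fun n => if P n then 'S' else 'E') (y :: d'')
                  rw [List.nil_append]
              | cons e E'' =>
                  show pvPairs (fun n => if P n then 'S' else 'E') (y :: d'') =
                    (if e < y then [(x, e)] else []) ++
                      pvPairs (fun n => if P n then 'S' else 'E') (y :: d'')
                  have hney : ¬ e < y := hminy e (List.mem_append_right _ List.mem_cons_self)
                  rw [if_neg hney, List.nil_append]
            · -- y is an end value: both sides emit (x, y)
              have hPyf : P y = false := by
                cases h : P y
                · rfl
                · exact absurd h hPy
              have hyE : y ∈ E := by
                rcases List.mem_append.mp hymem with h1 | h1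
                · rw [hPS' y h1] at hPyf; exact absurd hPyf (by decide)
                · exact h1
              obtain ⟨E'', hEeq⟩ := head_of_sorted_mem E y hE hyE
                (fun a ha => hminy a (List.mem_append_right _ ha))
              have hL : pvPairs (fun n => if P n then 'S' else 'E') (x :: y :: d'') =
                  [(x, y)] ++ pvPairs (fun n => if P n then 'S' else 'E') (y :: d'') := by
                show (if (if P x then 'S' else 'E') = 'S' ∧ (if P y then 'S' else 'E') = 'E'
                    then [(x, y)] else []) ++
                    pvPairs (fun n => if P n then 'S' else 'E') (y :: d'') = _
                rw [if_pos ⟨by rw [if_pos hPx], by rw [hPyf]; rfl⟩]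
              rw [hL, hEeq]
              cases hS'c : S' with
              | nil => rfl
              | cons s' S₃ =>
                  show [(x, y)] ++ pvPairs (fun n => if P n then 'S' else 'E') (y :: d'') =
                    (if y < s' then [(x, y)] else []) ++
                      pvPairs (fun n => if P n then 'S' else 'E') (y :: d'')
                  rw [if_pos]
                  have hs'm : s' ∈ S' ++ E := List.mem_append_left _ (by rw [hS'c]; exact List.mem_cons_self)
                  have hns : ¬ s' < y := hminy s' hs'm
                  have hne : ¬ y = s' := by
                    intro hc
                    have hps := hPS' s' (by rw [hS'c]; exact List.mem_cons_self)
                    rw [← hc, hPyf] at hps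
                    exact absurd hps (by decide)
                  omega
      · -- x is the least remaining value and is an end value: E = x :: E'
        have hPxf : P x = false := by
          cases h : P x
          · rfl
          · exact absurd h hPx
        have hxE : x ∈ E := by
          rcases List.mem_append.mp hxmem with h1 | h1
          · rw [hPS x h1] at hPxf; exact absurd hPxf (by decide)
          · exact h1
        obtain ⟨E', hEeq⟩ := head_of_sorted_mem E x hE hxE
          (fun a ha => hmin a (List.mem_append_right _ ha))
        subst hEeq
        have hpermtail : d'.Perm (S ++ E') := by
          have h1 : (x :: d').Perm (x :: (S ++ E')) :=
            hperm.trans List.perm_middle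
          exact h1.cons_inv
        have hE' : E'.Pairwise (· < ·) := (List.pairwise_cons.mp hE).2
        have hPE' : ∀ e ∈ E', P e = false := fun e he => hPE e (List.mem_cons_of_mem _ he)
        have hrec := ih S E' hd' hS hE' hPS hPE' hpermtail
        rw [pvPairs_cons_E P x d' hPxf, hrec]
        -- bRec S (x :: E') = bRec S E'
        cases hSc : S with
        | nil => rfl
        | cons s S'' =>
            have hxs : x < s := by
              have hns : ¬ s < x := hmin s (List.mem_append_left _ (by rw [hSc]; exact List.mem_cons_self))
              have hne : ¬ x = s := by
                intro hc
                have hps := hPS s (by rw [hSc]; exact List.mem_cons_self)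
                rw [← hc, hPxf] at hps
                exact absurd hps (by decide)
              omega
            rw [bRec, bRec, List.dropWhile_cons, if_pos (by simpa using hxs)]

-- ===== assembling both sides =====

theorem translate_predictions_spec : Claim_equal_translate_predictions := by
  intro starts ends _
  unfold Spec_translate_predictions translate_predictions translate_predictions_alt
  by_cases hs : starts.length == 0 || ends.length == 0
  · rw [if_pos hs, if_pos]
    cases starts <;> cases ends <;> simp_all
  · rw [if_neg hs, if_neg (by cases starts <;> cases ends <;> simp_all)]
    set c := PySem.List.sorted (starts ++ ends) (fun x => x) false with hc
    set P : Int → Bool := fun n => starts.contains n with hP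
    set S := PySem.List.sorted (PySem.Set.ofList starts) (fun x => x) false with hSdef
    set E := PySem.List.sorted
      ((PySem.Set.ofList ends).filter (fun v => !(PySem.Set.ofList starts).contains v))
      (fun x => x) false with hEdef
    -- A-side: label table + while loop = pvPairs over c
    have hmem : ∀ n ∈ c, n ∈ starts ∨ n ∈ ends := by
      intro n hn
      have : n ∈ starts ++ ends := (PySem.List.mem_sorted _ _ _ n).mp hn
      simpa using this
    have hA : pyWhile (pyLabelLoop starts ends c) c 0 [] =
        pvPairs (fun n => if P n then 'S' else 'E') c := by
      rw [pyLabelLoop_eq_map starts ends _ hmem,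
          pyWhile_eq_pairs (fun n => if P n then 'S' else 'E') c 0]
      simp
    -- B-side: index loop = bRec
    have hB : bLoop S E 0 0 [] = bRec S E := by
      rw [bLoop_eq_bRec S E 0 0 [] (Nat.zero_le _)]
      simp
    rw [hA, hB]
    -- facts about c, S, E
    have hcle : c.Pairwise (· ≤ ·) := by
      rw [hc]; exact PySem.List.sorted_pairwise (starts ++ ends) (fun x => x)
    have hdlt : (pvDd c).Pairwise (· < ·) := pvDd_pairwise_lt c hcle
    have hSlt : S.Pairwise (· < ·) := PySem.List.sorted_ofList_pairwise_lt starts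
    have hEnodup : E.Nodup := by
      have h1 : ((PySem.Set.ofList ends).filter
          (fun v => !(PySem.Set.ofList starts).contains v)).Nodup :=
        List.Nodup.filter _ (PySem.Set.nodup_ofList ends)
      exact (PySem.List.sorted_perm _ _ _).nodup_iff.mpr h1
    have hElt : E.Pairwise (· < ·) := by
      have h1 : E.Pairwise (· ≤ ·) := by
        rw [hEdef]
        exact PySem.List.sorted_pairwise
          ((PySem.Set.ofList ends).filter (fun v => !(PySem.Set.ofList starts).contains v))
          (fun x => x)
      have h2 : E.Pairwise (· ≠ ·) := hEnodup
      exact (h1.and h2).imp (fun h => lt_of_le_of_ne h.1 h.2)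
    have hmemS : ∀ x, x ∈ S ↔ x ∈ starts := by
      intro x
      rw [hSdef, PySem.List.mem_sorted, PySem.Set.mem_ofList]
    have hmemE : ∀ x, x ∈ E ↔ (x ∈ ends ∧ x ∉ starts) := by
      intro x
      rw [hEdef, PySem.List.mem_sorted, List.mem_filter, PySem.Set.mem_ofList]
      simp [PySem.Set.mem_ofList]
    have hPS : ∀ s ∈ S, P s = true := by
      intro s hsm
      exact List.contains_iff_mem.mpr ((hmemS s).mp hsm)
    have hPE : ∀ e ∈ E, P e = false := by
      intro e hem
      have hnm := ((hmemE e).mp hem).2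
      show starts.contains e = false
      rw [List.contains_eq_mem]
      exact decide_eq_false hnm
    have hperm : (pvDd c).Perm (S ++ E) := by
      rw [List.perm_ext_iff_of_nodup (hdlt.imp ne_of_lt)
        (List.Nodup.append (hSlt.imp ne_of_lt) (hElt.imp ne_of_lt) ?_)]
      · intro a
        rw [mem_pvDd, List.mem_append, hmemS a, hmemE a, hc,
            PySem.List.mem_sorted, List.mem_append]
        constructor
        · rintro (h1 | h1)
          · exact Or.inl h1
          · by_cases h2 : a ∈ starts
            · exact Or.inl h2
            · exact Or.inr ⟨h1, h2⟩
        · rintro (h1 | ⟨h1, -⟩)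
          · exact Or.inl h1
          · exact Or.inr h1
      · intro a haS haE
        exact ((hmemE a).mp haE).2 ((hmemS a).mp haS)
    rw [← pvPairs_pvDd (fun n => if P n then 'S' else 'E') c]
    exact pvPairs_eq_bRec P (pvDd c) S E hdlt hSlt hElt hPS hPE hperm
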